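-- pv_equiv track=rewrite | github.com/rdpbecker/qml-util | qmltags.py | getMatchingBrace
-- ===== SOURCE A (Python) =====
-- indent = 4
--
-- def unindent(content):
--     return [line[indent:] for line in content]
--
-- def numForwardBraces(line):
--     count = 0
--     while line.find("{") > -1:
--         line = line[:line.find("{")] + line[line.find("{")+1:]
--         count = count + 1
--     return count
--
-- def numBackBraces(line):
--     count = 0
--     while line.find("}") > -1:
--         line = line[:line.find("}")] + line[line.find("}")+1:]
--         count = count + 1
--     return count
--
-- def getMatchingBrace(content,start):
--     braceCount = 0
--     for i in range(start,len(content)):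
--         if not len(content[i]):
--             continue
--         braceCount = braceCount + numForwardBraces(content[i]) - numBackBraces(content[i])
--         if not braceCount:
--             return i, unindent(content[start+1:i])
--     return len(content), content[start+1:]
-- ===== SOURCE B (Python) =====
-- indent = 4
--
-- def getMatchingBrace(content, start):
--     n = len(content)
--     idxs = range(start, n)
--     # pass 1: cumulative brace balance per line (empty lines contribute 0)
--     bal = 0
--     cums = []
--     for i in idxs:
--         bal += sum(1 if ch == '{' else -1 if ch == '}' else 0 for ch in content[i])
--         cums.append(bal)
--     # pass 2: first non-empty line where the balance closes
--     for i, c in zip(idxs, cums):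
--         if content[i] and c == 0:
--             return i, [line[indent:] for line in content[start + 1:i]]
--     return n, content[start + 1:]
-- ===== Notes on version B (the rewrite author's own statement) =====
-- stated objective: alternative
-- what changed: Replaces the single early-exit loop with quadratic per-line brace removal by two passes: first a full cumulative brace-balance table (per-line balance computed by one linear character scan instead of repeated find-and-rebuild string surgery), then a scan returning the first non-empty line whose cumulative balance is zero.
import Mathlib
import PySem

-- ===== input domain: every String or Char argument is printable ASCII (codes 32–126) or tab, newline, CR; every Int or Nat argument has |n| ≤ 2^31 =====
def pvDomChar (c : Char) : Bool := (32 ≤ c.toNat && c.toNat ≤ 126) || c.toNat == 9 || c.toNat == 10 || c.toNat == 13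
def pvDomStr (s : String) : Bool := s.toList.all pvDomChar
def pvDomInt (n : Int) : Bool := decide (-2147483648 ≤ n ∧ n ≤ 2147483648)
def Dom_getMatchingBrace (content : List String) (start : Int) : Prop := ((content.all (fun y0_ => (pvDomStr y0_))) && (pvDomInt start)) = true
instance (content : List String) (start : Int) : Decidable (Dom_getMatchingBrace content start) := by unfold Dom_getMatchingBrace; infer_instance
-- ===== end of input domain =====

-- ===== PORT A =====
-- B replaces A's early-exit loop (quadratic find-and-rebuild brace removal per line) by a
-- cumulative balance table built in one pass plus a separate scan; equal values, alternative structure.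

-- module constant `indent = 4`
def pyIndent : Int := 4

-- unindent(content) = [line[indent:] for line in content]
def unindentA (content : List String) : List String :=
  content.map (fun line => PySem.Str.slice line (some pyIndent) none)

-- the shared while-loop shape of numForwardBraces/numBackBraces, on code points:
--   while line.find(b) > -1: line = line[:line.find(b)] + line[line.find(b)+1:]; count += 1
def braceLoop (b : Char) (line : List Char) (count : Int) : Int :=
  if h : PySem.Chars.find line [b] > -1 then
    braceLoop b
      (PySem.List.slice line none (some (PySem.Chars.find line [b])) ++
       PySem.List.slice line (some (PySem.Chars.find line [b] + 1)) none)
      (count + 1)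
  else count
termination_by line.length
decreasing_by
  have hf : (0 : Int) ≤ PySem.Chars.find line [b] := by omega
  have hpre := (PySem.Chars.find_spec hf).1
  have hlt : (PySem.Chars.find line [b]).toNat < line.length := by
    have := hpre.length_le
    simp only [List.length_drop, List.length_cons, List.length_nil] at this
    omega
  rw [PySem.List.slice_to _ hf, PySem.List.slice_from _ (by omega)]
  simp only [List.length_append, List.length_take, List.length_drop]
  omega

def numForwardBraces (line : String) : Int := braceLoop '{' line.toList 0

def numBackBraces (line : String) : Int := braceLoop '}' line.toList 0

-- the for-loop of getMatchingBrace, over the remaining indices of range(start, len(content))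
def loopA (content : List String) (start : Int) : List Int → Int → Int × List String
  | [], _ => ((content.length : Int), PySem.List.slice content (some (start + 1)) none)
  | i :: rest, braceCount =>
    let line := PySem.List.pyGetD content i ""
    if PySem.Str.len line = 0 then loopA content start rest braceCount
    else
      let bc := braceCount + numForwardBraces line - numBackBraces line
      if bc = 0 then (i, unindentA (PySem.List.slice content (some (start + 1)) (some i)))
      else loopA content start rest bc

def getMatchingBrace (content : List String) (start : Int) : Int × List String :=
  loopA content start (PySem.List.pyRange start (content.length : Int) 1) 0

-- ===== PORT B =====
-- bal += sum(1 if ch == '{' else -1 if ch == '}' else 0 for ch in content[i])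
def lineDelta (line : String) : Int :=
  (line.toList.map (fun ch => if ch = '{' then (1 : Int) else if ch = '}' then (-1 : Int) else 0)).sum

-- pass 1: for i in idxs: bal += ...; cums.append(bal)
def cumsB (content : List String) (idxs : List Int) : List Int :=
  (idxs.foldl
    (fun (st : Int × List Int) i =>
      let bal := st.1 + lineDelta (PySem.List.pyGetD content i "")
      (bal, st.2 ++ [bal]))
    ((0 : Int), ([] : List Int))).2

-- pass 2: for i, c in zip(idxs, cums): if content[i] and c == 0: return ...
def scanB (content : List String) (start : Int) : List (Int × Int) → Int × List String
  | [] => ((content.length : Int), PySem.List.slice content (some (start + 1)) none)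
  | (i, c) :: rest =>
    if PySem.Str.len (PySem.List.pyGetD content i "") ≠ 0 ∧ c = 0 then
      (i, (PySem.List.slice content (some (start + 1)) (some i)).map
            (fun line => PySem.Str.slice line (some pyIndent) none))
    else scanB content start rest

def getMatchingBrace_alt (content : List String) (start : Int) : Int × List String :=
  let idxs := PySem.List.pyRange start (content.length : Int) 1
  scanB content start (idxs.zip (cumsB content idxs))

-- ===== PRECONDITION & SPEC =====
-- A raises IndexError exactly when start < -len(content) (content[start] on the first iteration); nothing else raises.
def Pre_getMatchingBrace (content : List String) (start : Int) : Prop :=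
  -(content.length : Int) ≤ start
instance (content : List String) (start : Int) : Decidable (Pre_getMatchingBrace content start) := by
  unfold Pre_getMatchingBrace; infer_instance

def pvWitness_getMatchingBrace : List String × Int := (["Item {", "    x: 1", "}"], 0)

def Spec_getMatchingBrace (content : List String) (start : Int) (out : Int × List String) : Prop := out = getMatchingBrace_alt content start
instance (content : List String) (start : Int) (out : Int × List String) : Decidable (Spec_getMatchingBrace content start out) := by unfold Spec_getMatchingBrace; infer_instance

-- ===== CLAIM (what is proved, stated in full; the proofs are below) =====
def Claim_equal_getMatchingBrace : Prop := ∀ (content : List String) (start : Int), Dom_getMatchingBrace content start → Pre_getMatchingBrace content start → Spec_getMatchingBrace content start (getMatchingBrace content start)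

-- ===== LEMMAS AND PROOFS =====

-- A's destructive removal loop counts occurrences of b
theorem braceLoop_eq (b : Char) (line : List Char) (count : Int) :
    braceLoop b line count = count + (line.count b : Int) := by
  fun_induction braceLoop b line count with
  | case1 line count h ih =>
    have hf : (0 : Int) ≤ PySem.Chars.find line [b] := by omega
    set f := (PySem.Chars.find line [b]).toNat with hfdef
    have hspec := PySem.Chars.find_spec hf
    have hpre := hspec.1
    have hfirst := hspec.2
    have hlt : f < line.length := by
      have := hpre.length_le
      simp only [List.length_drop, List.length_cons, List.length_nil] at this
      omega
    obtain ⟨t, ht⟩ := hpre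
    have hdropsucc : line.drop (f + 1) = t := by
      rw [← List.tail_drop, ← ht]
      rfl
    have htake : (line.take f).count b = 0 := by
      rw [List.count_eq_zero]
      intro hmem
      obtain ⟨i, hi, hget⟩ := List.mem_iff_getElem.mp hmem
      have hilen : i < line.length := by simp at hi; omega
      have hif : i < f := by simp at hi; omega
      refine hfirst i hif ⟨line.drop (i+1), ?_⟩
      rw [List.getElem_take] at hget
      rw [List.drop_eq_getElem_cons hilen, hget]
      rfl
    have hds : line.drop f = b :: t := ht.symm
    have hcount : line.count b = (line.take f).count b + (1 + t.count b) := by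
      conv_lhs => rw [← List.take_append_drop f line]
      rw [List.count_append, hds]
      simp only [List.count_cons_self]
      omega
    rw [ih]
    rw [PySem.List.slice_to _ hf, PySem.List.slice_from _ (by omega)]
    have h1 : (PySem.Chars.find line [b] + 1).toNat = f + 1 := by omega
    rw [h1, hdropsucc, List.count_append, hcount, htake]
    push_cast; ring
  | case2 line count h =>
    have hfind : PySem.Chars.find line [b] = -1 := by
      have := PySem.Chars.neg_one_le_find line [b]
      omega
    have hninf : ¬ [b] <:+: line := (PySem.Chars.find_eq_neg_one_iff line [b]).mp hfind
    have : b ∉ line := by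
      intro hmem
      obtain ⟨s1, s2, hsplit⟩ := List.append_of_mem hmem
      exact hninf ⟨s1, s2, by simp [hsplit]⟩
    rw [List.count_eq_zero.mpr this]
    simp


-- B's per-character signed sum is the difference of the two counts
theorem lineDelta_eq (line : String) :
    lineDelta line = (line.toList.count '{' : Int) - (line.toList.count '}' : Int) := by
  unfold lineDelta
  generalize line.toList = l
  induction l with
  | nil => simp
  | cons c t ih =>
    simp only [List.map_cons, List.sum_cons, List.count_cons, ih]
    by_cases h1 : c = '{' <;> by_cases h2 : c = '}' <;>
      simp [h1, h2] <;> ring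

-- the cumulative-balance list, structurally
def cumList (content : List String) : Int → List Int → List Int
  | _, [] => []
  | b, i :: rest =>
    (b + lineDelta (PySem.List.pyGetD content i "")) ::
      cumList content (b + lineDelta (PySem.List.pyGetD content i "")) rest

theorem cumsB_foldl (content : List String) (idxs : List Int) :
    ∀ (b : Int) (acc : List Int),
      (idxs.foldl
        (fun (st : Int × List Int) i =>
          let bal := st.1 + lineDelta (PySem.List.pyGetD content i "")
          (bal, st.2 ++ [bal]))
        (b, acc)).2 = acc ++ cumList content b idxs := by
  induction idxs with
  | nil => intro b acc; simp [cumList]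
  | cons i rest ih =>
    intro b acc
    simp only [List.foldl_cons, cumList]
    rw [ih]
    simp

theorem loopA_eq_scanB (content : List String) (start : Int) (idxs : List Int) :
    ∀ b : Int, loopA content start idxs b
      = scanB content start (idxs.zip (cumList content b idxs)) := by
  induction idxs with
  | nil => intro b; rfl
  | cons i rest ih =>
    intro b
    simp only [cumList, List.zip_cons_cons, scanB, loopA]
    have hd : numForwardBraces (PySem.List.pyGetD content i "") -
        numBackBraces (PySem.List.pyGetD content i "") =
        lineDelta (PySem.List.pyGetD content i "") := by
      unfold numForwardBraces numBackBraces
      rw [braceLoop_eq, braceLoop_eq, lineDelta_eq]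
      ring
    by_cases hlen : PySem.Str.len (PySem.List.pyGetD content i "") = 0
    · have hnil : (PySem.List.pyGetD content i "").toList = [] := by
        rw [← List.length_eq_zero_iff]
        simpa using hlen
      have hzero : lineDelta (PySem.List.pyGetD content i "") = 0 := by
        unfold lineDelta; rw [hnil]; simp
      simp only [hlen, hzero, add_zero]
      rw [if_pos trivial, ih b, if_neg (fun hc => hc.1 rfl)]
    · simp only [if_neg hlen]
      have hb : b + numForwardBraces (PySem.List.pyGetD content i "") -
          numBackBraces (PySem.List.pyGetD content i "") =
          b + lineDelta (PySem.List.pyGetD content i "") := by omega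
      rw [hb]
      by_cases hz : b + lineDelta (PySem.List.pyGetD content i "") = 0
      · rw [if_pos hz, if_pos ⟨hlen, hz⟩]
        simp [unindentA]
      · rw [if_neg hz, if_neg (fun hc => hz hc.2)]
        exact ih _

-- ===== VERDICT (by name: the statement is the Claim_ definition above) =====
theorem getMatchingBrace_spec : Claim_equal_getMatchingBrace := by
  intro content start _ _
  unfold Spec_getMatchingBrace getMatchingBrace getMatchingBrace_alt cumsB
  dsimp only
  rw [cumsB_foldl, List.nil_append, loopA_eq_scanB]
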